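-- pv_equiv track=rewrite | github.com/fish-and-bear/psgc | parsers/match_zip_codes.py | _parse_sql_row
-- ===== SOURCE A (Python) =====
-- def _parse_sql_row(row: str) -> list[str]:
--     """Parse a comma-separated SQL row respecting quotes."""
--     fields: list[str] = []
--     current = ""
--     in_quote = False
--     quote_char = ""
--
--     for char in row:
--         if not in_quote and char in ("'", '"'):
--             in_quote = True
--             quote_char = char
--             current += char
--         elif in_quote and char == quote_char:
--             in_quote = False
--             current += char
--         elif not in_quote and char == ",":
--             fields.append(current.strip())
--             current = ""
--         else:
--             current += char
--
--     if current.strip():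
--         fields.append(current.strip())
--
--     return fields
-- ===== SOURCE B (Python) =====
-- def _parse_sql_row(row: str) -> list[str]:
--     """Parse a comma-separated SQL row respecting quotes (two-phase: mark, then split)."""
--     # Phase 1: one scan that marks each position: None for an unquoted comma
--     # (a separator), the character itself otherwise.
--     marked = []
--     in_quote = False
--     quote_char = ""
--     for ch in row:
--         if in_quote:
--             marked.append(ch)
--             if ch == quote_char:
--                 in_quote = False
--         elif ch in ("'", '"'):
--             in_quote = True
--             quote_char = ch
--             marked.append(ch)
--         elif ch == ",":
--             marked.append(None)
--         else:
--             marked.append(ch)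
--     # Phase 2: generic split on the separator marks, then strip each segment;
--     # the final field is dropped when it strips to the empty string.
--     segments = [[]]
--     for t in marked:
--         if t is None:
--             segments.append([])
--         else:
--             segments[-1].append(t)
--     fields = ["".join(s).strip() for s in segments]
--     if not fields[-1]:
--         fields.pop()
--     return fields
-- ===== Notes on version B (the rewrite author's own statement) =====
-- stated objective: alternative
-- what changed: B replaces A's single accumulating pass (growing a current-field string and flushing it at each unquoted comma) by two phases: one scan that only marks which positions are unquoted separators, then a generic split on the marks followed by a strip/drop-last post-pass.
import Mathlib
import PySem

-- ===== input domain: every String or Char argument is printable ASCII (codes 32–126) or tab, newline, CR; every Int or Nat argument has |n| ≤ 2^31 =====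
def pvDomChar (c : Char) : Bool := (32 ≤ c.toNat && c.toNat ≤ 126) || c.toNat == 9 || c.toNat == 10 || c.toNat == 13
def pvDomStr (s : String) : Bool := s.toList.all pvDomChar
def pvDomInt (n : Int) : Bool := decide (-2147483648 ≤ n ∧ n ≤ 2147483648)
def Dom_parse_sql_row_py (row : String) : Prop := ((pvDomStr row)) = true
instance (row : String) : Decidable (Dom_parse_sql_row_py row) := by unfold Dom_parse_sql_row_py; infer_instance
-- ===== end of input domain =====

-- B is an alternative decomposition: mark separator positions in one scan, then split/strip; not faster.

-- ===== PORT A =====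
-- A's loop state: (fields, current, in_quote, quote_char); quote_char is the 1-char string, kept as List Char ("" = []).
def pvAstep (st : List (List Char) × List Char × Bool × List Char) (c : Char) :
    List (List Char) × List Char × Bool × List Char :=
  let (fields, cur, inq, qc) := st
  if !inq && (c == '\'' || c == '"') then (fields, cur ++ [c], true, [c])
  else if inq && ([c] == qc) then (fields, cur ++ [c], false, qc)
  else if !inq && (c == ',') then (fields ++ [PySem.Chars.strip cur], [], inq, qc)
  else (fields, cur ++ [c], inq, qc)

def parse_sql_row_py (row : String) : List String :=
  let st := row.toList.foldl pvAstep ([], [], false, [])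
  let fields := st.1
  let cur := st.2.1
  (if PySem.Chars.strip cur ≠ [] then fields ++ [PySem.Chars.strip cur] else fields).map String.mk

-- ===== PORT B =====
-- Phase 1 of Source B: mark each position (none = unquoted comma, i.e. a separator).
def pvMark : List Char → Bool → List Char → List (Option Char)
  | [], _, _ => []
  | c :: rest, inq, qc =>
    if inq then some c :: pvMark rest (!([c] == qc)) qc
    else if c == '\'' || c == '"' then some c :: pvMark rest true [c]
    else if c == ',' then none :: pvMark rest inq qc
    else some c :: pvMark rest inq qc

-- Phase 2 of Source B, first loop: split the marked stream on the separator marks.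
def pvSplit : List (Option Char) → List (List Char)
  | [] => [[]]
  | none :: ts => [] :: pvSplit ts
  | some c :: ts =>
    match pvSplit ts with
    | h :: t => (c :: h) :: t
    | [] => [[c]]

def parse_sql_row_py_alt (row : String) : List String :=
  let marked := pvMark row.toList false []
  let segments := pvSplit marked
  let fields := segments.map PySem.Chars.strip
  (if fields.getLastD [] = [] then fields.dropLast else fields).map String.mk

-- ===== PRECONDITION & SPEC =====
def Spec_parse_sql_row_py (row : String) (out : List String) : Prop := out = parse_sql_row_py_alt row
instance (row : String) (out : List String) : Decidable (Spec_parse_sql_row_py row out) := by unfold Spec_parse_sql_row_py; infer_instance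

-- ===== CLAIM (what is proved, stated in full; the proofs are below) =====
def Claim_equal_parse_sql_row_py : Prop := ∀ (row : String), Dom_parse_sql_row_py row → Spec_parse_sql_row_py row (parse_sql_row_py row)

-- ===== LEMMAS AND PROOFS =====

-- strip every segment, drop the last one if it strips empty (proof-side form of B's phase-2 tail)
def pvFin : List (List Char) → List (List Char)
  | [] => []
  | [s] => if PySem.Chars.strip s = [] then [] else [PySem.Chars.strip s]
  | s :: rest => PySem.Chars.strip s :: pvFin rest

def pvConsFirst (cur : List Char) : List (List Char) → List (List Char)
  | [] => [cur]
  | h :: t => (cur ++ h) :: t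

theorem pvSplit_ne_nil (ts : List (Option Char)) : pvSplit ts ≠ [] := by
  induction ts with
  | nil => simp [pvSplit]
  | cons t rest ih =>
    cases t with
    | none => simp [pvSplit]
    | some c =>
      simp only [pvSplit]
      cases h : pvSplit rest <;> simp

theorem pvConsFirst_nil_left (ss : List (List Char)) (h : ss ≠ []) : pvConsFirst [] ss = ss := by
  cases ss with
  | nil => exact absurd rfl h
  | cons a t => simp [pvConsFirst]

theorem pvFin_eq_tail (segs : List (List Char)) (h : segs ≠ []) :
    (if (segs.map PySem.Chars.strip).getLastD [] = []
      then (segs.map PySem.Chars.strip).dropLast else segs.map PySem.Chars.strip)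
    = pvFin segs := by
  induction segs with
  | nil => simp at h
  | cons s rest ih =>
    cases rest with
    | nil => simp [pvFin]
    | cons s2 t =>
      have ihh := ih (by simp)
      obtain ⟨x, hx⟩ := Option.isSome_iff_exists.mp (List.getLast?_isSome.mpr
        (show (PySem.Chars.strip s2 :: List.map PySem.Chars.strip t) ≠ [] by simp))
      simp only [List.map_cons] at ihh ⊢
      rw [List.getLastD_eq_getLast?, hx, Option.getD_some] at ihh
      rw [List.getLastD_cons, List.getLastD_eq_getLast?, hx, Option.getD_some]
      rw [List.dropLast_cons_of_ne_nil (by simp)]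
      rw [show pvFin (s :: s2 :: t) = PySem.Chars.strip s :: pvFin (s2 :: t) from rfl]
      split_ifs with hx0
      · rw [if_pos hx0] at ihh; rw [ihh]
      · rw [if_neg hx0] at ihh; rw [ihh]

theorem pvMain (cs : List Char) :
    ∀ (fields : List (List Char)) (cur : List Char) (inq : Bool) (qc : List Char),
    (let st := cs.foldl pvAstep (fields, cur, inq, qc)
     if PySem.Chars.strip st.2.1 ≠ [] then st.1 ++ [PySem.Chars.strip st.2.1] else st.1)
    = fields ++ pvFin (pvConsFirst cur (pvSplit (pvMark cs inq qc))) := by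
  induction cs with
  | nil =>
    intro fields cur inq qc
    simp [pvMark, pvSplit, pvConsFirst, pvFin]
    split <;> simp_all
  | cons c rest ih =>
    intro fields cur inq qc
    simp only [List.foldl_cons]
    cases inq with
    | true =>
      by_cases hq : ([c] == qc) = true
      · have h1 : pvAstep (fields, cur, true, qc) c = (fields, cur ++ [c], false, qc) := by
          simp [pvAstep, hq]
        rw [h1, ih]
        have h2 : pvMark (c :: rest) true qc = some c :: pvMark rest false qc := by
          simp [pvMark, hq]
        rw [h2]
        simp only [pvSplit]
        cases h : pvSplit (pvMark rest false qc) with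
        | nil => exact absurd h (pvSplit_ne_nil _)
        | cons sh st => simp [pvConsFirst]
      · have h1 : pvAstep (fields, cur, true, qc) c = (fields, cur ++ [c], true, qc) := by
          simp [pvAstep, hq]
        rw [h1, ih]
        have h2 : pvMark (c :: rest) true qc = some c :: pvMark rest true qc := by
          simp [pvMark, hq]
        rw [h2]
        simp only [pvSplit]
        cases h : pvSplit (pvMark rest true qc) with
        | nil => exact absurd h (pvSplit_ne_nil _)
        | cons sh st => simp [pvConsFirst]
    | false =>
      by_cases hquote : (c == '\'' || c == '"') = true
      · have h1 : pvAstep (fields, cur, false, qc) c = (fields, cur ++ [c], true, [c]) := by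
          simp [pvAstep, hquote]
        rw [h1, ih]
        have h2 : pvMark (c :: rest) false qc = some c :: pvMark rest true [c] := by
          simp [pvMark, hquote]
        rw [h2]
        simp only [pvSplit]
        cases h : pvSplit (pvMark rest true [c]) with
        | nil => exact absurd h (pvSplit_ne_nil _)
        | cons sh st => simp [pvConsFirst]
      · by_cases hc : (c == ',') = true
        · have h1 : pvAstep (fields, cur, false, qc) c
              = (fields ++ [PySem.Chars.strip cur], [], false, qc) := by
            simp [pvAstep, hquote, hc]
          rw [h1, ih]
          have h2 : pvMark (c :: rest) false qc = none :: pvMark rest false qc := by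
            simp [pvMark, hquote, hc]
          rw [h2]
          simp only [pvSplit]
          cases h : pvSplit (pvMark rest false qc) with
          | nil => exact absurd h (pvSplit_ne_nil _)
          | cons sh st =>
            simp only [pvConsFirst, List.nil_append]
            simp [pvFin]
        · have h1 : pvAstep (fields, cur, false, qc) c = (fields, cur ++ [c], false, qc) := by
            simp [pvAstep, hquote, hc]
          rw [h1, ih]
          have h2 : pvMark (c :: rest) false qc = some c :: pvMark rest false qc := by
            simp [pvMark, hquote, hc]
          rw [h2]
          simp only [pvSplit]
          cases h : pvSplit (pvMark rest false qc) with
          | nil => exact absurd h (pvSplit_ne_nil _)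
          | cons sh st => simp [pvConsFirst]

-- ===== VERDICT (by name: the statement is the Claim_ definition above) =====
theorem parse_sql_row_py_spec : Claim_equal_parse_sql_row_py := by
  intro row _
  simp only [Spec_parse_sql_row_py, parse_sql_row_py, parse_sql_row_py_alt]
  have h := pvMain row.toList [] [] false []
  simp only [List.nil_append] at h
  rw [h, pvConsFirst_nil_left _ (pvSplit_ne_nil _),
    ← pvFin_eq_tail _ (pvSplit_ne_nil _)]
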